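-- pv_equiv track=rewrite | github.com/lf157/xiuxian_bot | core/database/connection.py | _normalize_query_placeholders
-- ===== SOURCE A (Python) =====
-- def _normalize_query_placeholders(query: str) -> str:
--     """
--     Backward compatibility for legacy SQLite-style placeholders.
--     Convert qmark placeholders (`?`) to psycopg2 style (`%s`) outside quoted strings.
--     """
--     if "?" not in query:
--         return query
--
--     result: list[str] = []
--     in_single = False
--     in_double = False
--     i = 0
--     size = len(query)
--
--     while i < size:
--         ch = query[i]
--         if ch == "'" and not in_double:
--             result.append(ch)
--             if in_single and i + 1 < size and query[i + 1] == "'":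
--                 # Escaped single quote inside string literal: ''.
--                 result.append("'")
--                 i += 2
--                 continue
--             in_single = not in_single
--             i += 1
--             continue
--         if ch == '"' and not in_single:
--             in_double = not in_double
--             result.append(ch)
--             i += 1
--             continue
--         if ch == "?" and not in_single and not in_double:
--             result.append("%s")
--         else:
--             result.append(ch)
--         i += 1
--
--     return "".join(result)
-- ===== SOURCE B (Python) =====
-- def _normalize_query_placeholders(query: str) -> str:
--     """Tokenizer: consume whole quoted literals in one step; convert bare ? to %s."""
--     if "?" not in query:
--         return query
--     out = []
--     i = 0
--     n = len(query)
--     while i < n: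
--         ch = query[i]
--         if ch == "'":
--             # consume the whole single-quoted literal (with '' escapes);
--             # an unterminated literal runs to end of string
--             j = i + 1
--             while j < n:
--                 if query[j] == "'":
--                     if j + 1 < n and query[j + 1] == "'":
--                         j += 2
--                         continue
--                     j += 1
--                     break
--                 j += 1
--             out.append(query[i:j])
--             i = j
--         elif ch == '"':
--             # consume the whole double-quoted literal (no escapes)
--             j = query.find('"', i + 1)
--             j = n if j == -1 else j + 1
--             out.append(query[i:j])
--             i = j
--         elif ch == "?":
--             out.append("%s")
--             i += 1
--         else:
--             out.append(ch)
--             i += 1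
--     return "".join(out)
-- ===== Notes on version B (the rewrite author's own statement) =====
-- stated objective: alternative
-- what changed: Replaces A's per-character state machine with boolean in_single/in_double flags by a tokenizer that, at each quote, consumes the entire quoted literal (with '' escapes for single quotes, unterminated literals running to end of string) in one inner step and never tracks mode flags.
import Mathlib
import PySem

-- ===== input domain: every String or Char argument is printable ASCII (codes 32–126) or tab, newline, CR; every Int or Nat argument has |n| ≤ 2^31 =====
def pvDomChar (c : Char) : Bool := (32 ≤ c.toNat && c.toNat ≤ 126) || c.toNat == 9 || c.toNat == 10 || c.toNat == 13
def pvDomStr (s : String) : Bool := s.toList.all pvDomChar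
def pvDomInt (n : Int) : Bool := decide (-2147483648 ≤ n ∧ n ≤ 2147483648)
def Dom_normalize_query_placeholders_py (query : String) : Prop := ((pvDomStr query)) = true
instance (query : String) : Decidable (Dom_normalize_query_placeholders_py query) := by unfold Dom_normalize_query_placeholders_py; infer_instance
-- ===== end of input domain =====

-- B replaces A's boolean-flag state machine by a tokenizer consuming whole quoted
-- literals in one step (alternative decomposition, same cost).

-- ===== PORT A =====
-- A's index loop with in_single/in_double flags, as structural recursion on the
-- character list; the 'i + 1 < size and query[i + 1] == "'"' lookahead becomes
-- 'rest.head? = some quote' (and i += 2 becomes recursing on rest.tail).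
def pvALoop : List Char → Bool → Bool → List Char
  | [], _, _ => []
  | ch :: rest, in_single, in_double =>
    if ch = '\'' && !in_double then
      if in_single && rest.head? = some '\'' then
        '\'' :: '\'' :: pvALoop rest.tail in_single in_double
      else
        '\'' :: pvALoop rest (!in_single) in_double
    else if ch = '"' && !in_single then
      ch :: pvALoop rest in_single (!in_double)
    else if ch = '?' && !in_single && !in_double then
      '%' :: 's' :: pvALoop rest in_single in_double
    else
      ch :: pvALoop rest in_single in_double
  termination_by cs _ _ => cs.length
  decreasing_by
  all_goals simp [List.length_tail]

def normalize_query_placeholders_py (query : String) : String :=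
  if !query.toList.contains '?' then query
  else String.ofList (pvALoop query.toList false false)

-- ===== PORT B =====
-- pvSq cs = (chars of the single-quoted literal after the opening quote, rest):
-- '' is an escaped quote, a lone ' closes, end of string closes the literal.
def pvSq : List Char → List Char × List Char
  | [] => ([], [])
  | '\'' :: '\'' :: r => let p := pvSq r; ('\'' :: '\'' :: p.1, p.2)
  | '\'' :: r => (['\''], r)
  | c :: r => let p := pvSq r; (c :: p.1, p.2)

-- pvDq cs = same for a double-quoted literal (no escapes).
def pvDq : List Char → List Char × List Char
  | [] => ([], [])
  | '"' :: r => (['"'], r)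
  | c :: r => let p := pvDq r; (c :: p.1, p.2)

theorem pvSq_len : ∀ cs : List Char, (pvSq cs).2.length ≤ cs.length := by
  intro cs
  induction cs using pvSq.induct <;> simp_all [pvSq] <;> omega

theorem pvDq_len : ∀ cs : List Char, (pvDq cs).2.length ≤ cs.length := by
  intro cs
  induction cs using pvDq.induct <;> simp_all [pvDq] <;> omega

def pvBScan : List Char → List Char
  | [] => []
  | '\'' :: rest =>
    let p := pvSq rest
    '\'' :: (p.1 ++ pvBScan p.2)
  | '"' :: rest =>
    let p := pvDq rest
    '"' :: (p.1 ++ pvBScan p.2)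
  | '?' :: rest => '%' :: 's' :: pvBScan rest
  | c :: rest => c :: pvBScan rest
  termination_by cs => cs.length
  decreasing_by
  · have := pvSq_len rest; simp; omega
  · have := pvDq_len rest; simp; omega
  · simp
  · simp

def normalize_query_placeholders_py_alt (query : String) : String :=
  if !query.toList.contains '?' then query
  else String.ofList (pvBScan query.toList)

-- ===== PRECONDITION & SPEC =====
def Spec_normalize_query_placeholders_py (query : String) (out : String) : Prop := out = normalize_query_placeholders_py_alt query
instance (query : String) (out : String) : Decidable (Spec_normalize_query_placeholders_py query out) := by unfold Spec_normalize_query_placeholders_py; infer_instance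

-- ===== CLAIM (what is proved, stated in full; the proofs are below) =====
def Claim_equal_normalize_query_placeholders_py : Prop := ∀ (query : String), Dom_normalize_query_placeholders_py query → Spec_normalize_query_placeholders_py query (normalize_query_placeholders_py query)

-- ===== LEMMAS AND PROOFS =====

-- Per-branch unfolding lemmas for A's loop.
theorem pvALoop_nil (s d : Bool) : pvALoop [] s d = [] := by
  rw [pvALoop]

theorem pvALoop_esc (r : List Char) :
    pvALoop ('\'' :: '\'' :: r) true false = '\'' :: '\'' :: pvALoop r true false := by
  rw [pvALoop]; simp

theorem pvALoop_sq_open (r : List Char) :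
    pvALoop ('\'' :: r) false false = '\'' :: pvALoop r true false := by
  rw [pvALoop]; simp

theorem pvALoop_sq_close (r : List Char) (h : r.head? ≠ some '\'') :
    pvALoop ('\'' :: r) true false = '\'' :: pvALoop r false false := by
  rw [pvALoop]; simp [h]

theorem pvALoop_dq_toggle (r : List Char) (d : Bool) :
    pvALoop ('"' :: r) false d = '"' :: pvALoop r false (!d) := by
  rw [pvALoop]; simp

theorem pvALoop_qmark (r : List Char) :
    pvALoop ('?' :: r) false false = '%' :: 's' :: pvALoop r false false := by
  rw [pvALoop]; simp

theorem pvALoop_other (c : Char) (r : List Char) (s d : Bool)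
    (h1 : ¬(c = '\'' ∧ d = false)) (h2 : ¬(c = '"' ∧ s = false))
    (h3 : ¬(c = '?' ∧ s = false ∧ d = false)) :
    pvALoop (c :: r) s d = c :: pvALoop r s d := by
  rw [pvALoop]
  rw [if_neg (by cases d <;> simp_all), if_neg (by cases s <;> simp_all),
      if_neg (by cases s <;> cases d <;> simp_all)]

-- In the single-quoted state A copies exactly the literal pvSq isolates.
theorem pvALoop_single : ∀ cs : List Char,
    pvALoop cs true false = (pvSq cs).1 ++ pvALoop (pvSq cs).2 false false := by
  intro cs
  induction cs using pvSq.induct with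
  | case1 => simp [pvSq, pvALoop_nil]
  | case2 r ih => rw [pvALoop_esc]; simp [pvSq]; exact ih
  | case3 r h =>
    have hh : r.head? ≠ some '\'' := by
      cases r with
      | nil => simp
      | cons a t =>
        simp only [List.head?_cons, ne_eq, Option.some.injEq]
        intro ha; exact h t (by rw [ha])
    rw [pvALoop_sq_close r hh]
    cases r with
    | nil => simp [pvSq]
    | cons a t =>
      have ha : a ≠ '\'' := by simpa using hh
      simp [pvSq]
  | case4 c r h hc ih =>
    rw [pvALoop_other c r true false (by simp_all) (by simp) (by simp)]
    simp [pvSq, ih]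

-- In the double-quoted state A copies exactly the literal pvDq isolates.
theorem pvALoop_double : ∀ cs : List Char,
    pvALoop cs false true = (pvDq cs).1 ++ pvALoop (pvDq cs).2 false false := by
  intro cs
  induction cs using pvDq.induct with
  | case1 => simp [pvDq, pvALoop_nil]
  | case2 r => rw [pvALoop_dq_toggle]; simp [pvDq]
  | case3 c r h ih =>
    rw [pvALoop_other c r false true (by simp) (by rintro ⟨hc, -⟩; exact h hc) (by simp)]
    have hc : c ≠ '"' := fun hc => h hc
    simp [pvDq, ih]

theorem pvBScan_other (c : Char) (rest : List Char)
    (h1 : c ≠ '\'') (h2 : c ≠ '"') (h3 : c ≠ '?') :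
    pvBScan (c :: rest) = c :: pvBScan rest := by
  rw [pvBScan.eq_def]
  split <;> simp_all

theorem pvALoop_eq_bScan : ∀ cs : List Char,
    pvALoop cs false false = pvBScan cs := by
  intro cs
  induction hn : cs.length using Nat.strong_induction_on generalizing cs with
  | _ n ih =>
  match cs with
  | [] => rw [pvBScan, pvALoop_nil]
  | '\'' :: rest =>
    rw [pvBScan, pvALoop_sq_open, pvALoop_single rest,
        ih ((pvSq rest).2.length) (by have := pvSq_len rest; simp at hn; omega) _ rfl]
  | '"' :: rest =>
    rw [pvBScan, pvALoop_dq_toggle]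
    simp only [Bool.not_false]
    rw [pvALoop_double rest,
        ih ((pvDq rest).2.length) (by have := pvDq_len rest; simp at hn; omega) _ rfl]
  | '?' :: rest =>
    rw [pvBScan, pvALoop_qmark,
        ih rest.length (by simp at hn; omega) _ rfl]
  | c :: rest =>
    have ihr := ih rest.length (by simp at hn; omega) rest rfl
    by_cases h1 : c = '\''
    · subst h1
      rw [pvBScan, pvALoop_sq_open, pvALoop_single rest,
          ih ((pvSq rest).2.length) (by have := pvSq_len rest; simp at hn; omega) _ rfl]
    · by_cases h2 : c = '"'
      · subst h2
        rw [pvBScan, pvALoop_dq_toggle]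
        simp only [Bool.not_false]
        rw [pvALoop_double rest,
            ih ((pvDq rest).2.length) (by have := pvDq_len rest; simp at hn; omega) _ rfl]
      · by_cases h3 : c = '?'
        · subst h3; rw [pvBScan, pvALoop_qmark, ihr]
        · rw [pvBScan_other c rest h1 h2 h3,
              pvALoop_other c rest false false (by simp [h1]) (by simp [h2]) (by simp [h3]),
              ihr]

-- ===== VERDICT (by name: the statement is the Claim_ definition above) =====
theorem normalize_query_placeholders_py_spec : Claim_equal_normalize_query_placeholders_py := by
  intro query _
  unfold Spec_normalize_query_placeholders_py
  unfold normalize_query_placeholders_py normalize_query_placeholders_py_alt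
  by_cases h : query.toList.contains '?'
  · have h' : '?' ∈ query.toList := by simpa [List.contains_iff_mem] using h
    rw [if_neg (by simp [h']), if_neg (by simp [h']), pvALoop_eq_bScan]
  · rw [if_pos (by simp_all), if_pos (by simp_all)]
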